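-- pv_equiv track=rewrite | github.com/kimdevspace/study-algorithm | 프로그래머스/1/140108. 문자열 나누기/문자열 나누기.py | solution
-- ===== SOURCE A (Python) =====
-- def solution(s):
--     answer=same=differ=0
--     for i in s:
--         if same==differ:
--             answer+=1
--             k=i
--         if k==i:
--             same+=1
--         else:
--             differ+=1
--     return answer
-- ===== SOURCE B (Python) =====
-- def solution(s):
--     answer = 0
--     i = 0
--     n = len(s)
--     while i < n:
--         first = s[i]
--         same = 0
--         differ = 0
--         j = i
--         while j < n:
--             if s[j] == first:
--                 same += 1
--             else:
--                 differ += 1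
--             j += 1
--             if same == differ:
--                 break
--         answer += 1
--         i = j
--     return answer
-- ===== Notes on version B (the rewrite author's own statement) =====
-- stated objective: alternative
-- what changed: Replaced A's single per-character fold with cross-group cumulative same/differ counters by a cursor-based outer loop that consumes one whole balanced group per iteration with an inner loop using fresh per-group counters.
import Mathlib
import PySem

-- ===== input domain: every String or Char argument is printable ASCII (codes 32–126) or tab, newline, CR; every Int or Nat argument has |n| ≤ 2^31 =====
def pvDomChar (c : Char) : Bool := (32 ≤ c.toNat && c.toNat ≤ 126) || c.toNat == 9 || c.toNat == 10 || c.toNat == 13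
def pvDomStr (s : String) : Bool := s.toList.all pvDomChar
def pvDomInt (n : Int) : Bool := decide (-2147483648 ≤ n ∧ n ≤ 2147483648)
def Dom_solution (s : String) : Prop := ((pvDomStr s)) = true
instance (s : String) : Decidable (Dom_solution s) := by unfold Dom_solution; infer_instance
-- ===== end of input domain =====

-- B replaces A's single fold with cumulative counters by a cursor loop consuming one whole group per
-- iteration with fresh per-group counters (objective: alternative decomposition, same O(n) cost).

-- ===== PORT A =====
-- state: (answer, same, differ, k); Python's unbound k before the first char is `none`
-- (it is never read before being set, since same == differ holds initially).
def stepA (st : Int × Int × Int × Option Char) (i : Char) : Int × Int × Int × Option Char :=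
  let p := if st.2.1 = st.2.2.1 then (st.1 + 1, some i) else (st.1, st.2.2.2)
  if p.2 = some i then (p.1, st.2.1 + 1, st.2.2.1, p.2)
  else (p.1, st.2.1, st.2.2.1 + 1, p.2)

def solution (s : String) : Int :=
  (s.toList.foldl stepA (0, 0, 0, (none : Option Char))).1

-- ===== PORT B =====
-- inner while loop of Source B: consume chars counting same/differ, stop when same == differ
-- or the string ends; returns the unconsumed suffix.
def solInner (first : Char) (same differ : Int) : List Char → List Char
  | [] => []
  | c :: rest =>
    if c = first then
      if same + 1 = differ then rest else solInner first (same + 1) differ rest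
    else
      if same = differ + 1 then rest else solInner first same (differ + 1) rest

theorem solInner_length (first : Char) (same differ : Int) (l : List Char) :
    (solInner first same differ l).length ≤ l.length := by
  induction l generalizing same differ with
  | nil => simp [solInner]
  | cons c rest ih =>
    simp only [solInner]
    split_ifs <;> simp [List.length_cons] <;>
      exact Nat.le_succ_of_le (ih _ _)

-- outer while loop of Source B over the cursor: one group per iteration.
def solOuter (l : List Char) : Int :=
  match l with
  | [] => 0
  | c :: rest => 1 + solOuter (solInner c 0 0 (c :: rest))
termination_by l.length
decreasing_by
  have h : solInner c 0 0 (c :: rest) = solInner c (0 + 1) 0 rest := by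
    simp [solInner]
  rw [h]
  exact Nat.lt_succ_of_le (solInner_length c (0 + 1) 0 rest)

def solution_alt (s : String) : Int := solOuter s.toList

-- ===== PRECONDITION & SPEC =====
def Spec_solution (s : String) (out : Int) : Prop := out = solution_alt s
instance (s : String) (out : Int) : Decidable (Spec_solution s out) := by unfold Spec_solution; infer_instance

-- ===== CLAIM (what is proved, stated in full; the proofs are below) =====
def Claim_equal_solution : Prop := ∀ (s : String), Dom_solution s → Spec_solution s (solution s)

-- ===== LEMMAS AND PROOFS =====

-- unfolding equations for the well-founded recursion of solOuter
theorem solOuter_nil : solOuter [] = 0 := by rw [solOuter.eq_def]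
theorem solOuter_cons (c : Char) (rest : List Char) :
    solOuter (c :: rest) = 1 + solOuter (solInner c 0 0 (c :: rest)) := by rw [solOuter.eq_def]

-- solInner only depends on the difference of its counters.
theorem solInner_shift (first : Char) (s d m : Int) (l : List Char) :
    solInner first (s + m) (d + m) l = solInner first s d l := by
  induction l generalizing s d with
  | nil => rfl
  | cons c rest ih =>
    simp only [solInner]
    by_cases hc : c = first
    · rw [if_pos hc, if_pos hc]
      have : s + m + 1 = d + m ↔ s + 1 = d := by omega
      by_cases h : s + 1 = d
      · rw [if_pos (this.mpr h), if_pos h]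
      · rw [if_neg (fun hh => h (this.mp hh)), if_neg h]
        have := ih (s + 1) d
        simpa [add_right_comm] using this
    · rw [if_neg hc, if_neg hc]
      have : s + m = d + m + 1 ↔ s = d + 1 := by omega
      by_cases h : s = d + 1
      · rw [if_pos (this.mpr h), if_pos h]
      · rw [if_neg (fun hh => h (this.mp hh)), if_neg h]
        have := ih s (d + 1)
        simpa [add_right_comm] using this

-- the main invariant: A's fold from a balanced state counts solOuter groups, and from an
-- unbalanced mid-group state it counts groups of the suffix solInner leaves.
theorem foldA_main (l : List Char) :
    (∀ a d k, (List.foldl stepA (a, d, d, k) l).1 = a + solOuter l) ∧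
    (∀ a s d c, s ≠ d →
      (List.foldl stepA (a, s, d, some c) l).1 = a + solOuter (solInner c s d l)) := by
  induction l with
  | nil => exact ⟨fun a d k => by simp [solOuter_nil], fun a s d c _ => by simp [solInner, solOuter_nil]⟩
  | cons c' rest ih =>
    constructor
    · intro a d k
      have hstep : stepA (a, d, d, k) c' = (a + 1, d + 1, d, some c') := by
        simp [stepA]
      rw [List.foldl_cons, hstep]
      have h2 := ih.2 (a + 1) (d + 1) d c' (by omega)
      rw [h2]
      have hshift : solInner c' (d + 1) d rest = solInner c' 1 0 rest := by
        have := solInner_shift c' 1 0 d rest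
        simpa [add_comm] using this
      have houter : solOuter (c' :: rest) = 1 + solOuter (solInner c' 1 0 rest) := by
        rw [solOuter_cons]
        have : solInner c' 0 0 (c' :: rest) = solInner c' 1 0 rest := by
          simp [solInner]
        rw [this]
      rw [hshift, houter]; ring
    · intro a s d c hsd
      by_cases hc : c' = c
      · subst hc
        have hstep : stepA (a, s, d, some c') c' = (a, s + 1, d, some c') := by
          simp [stepA, if_neg hsd]
        rw [List.foldl_cons, hstep]
        have hin : solInner c' s d (c' :: rest) =
            if s + 1 = d then rest else solInner c' (s + 1) d rest := by
          simp [solInner]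
        by_cases h : s + 1 = d
        · rw [hin, if_pos h, h]
          exact ih.1 a d (some c')
        · rw [hin, if_neg h]
          exact ih.2 a (s + 1) d c' h
      · have hstep : stepA (a, s, d, some c) c' = (a, s, d + 1, some c) := by
          simp [stepA, if_neg hsd]
          intro h
          exact absurd h.symm hc
        rw [List.foldl_cons, hstep]
        have hin : solInner c s d (c' :: rest) =
            if s = d + 1 then rest else solInner c s (d + 1) rest := by
          simp [solInner, if_neg hc]
        by_cases h : s = d + 1
        · rw [hin, if_pos h, h]
          exact ih.1 a (d + 1) (some c)
        · rw [hin, if_neg h]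
          exact ih.2 a s (d + 1) c h

-- ===== VERDICT (by name: the statement is the Claim_ definition above) =====
theorem solution_spec : Claim_equal_solution := by
  intro s _
  unfold Spec_solution solution solution_alt
  simpa using (foldA_main s.toList).1 0 0 none
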